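-- pv_equiv track=rewrite | github.com/deepfire/partus | pergamum.py | string_line_offsets
-- ===== SOURCE A (Python) =====
-- def string_line_offsets(string):
--         acc = [0]
--         for i, c in enumerate(string):
--                 if c == "\n":
--                         acc.append(i + 1)
--         if acc[-1] == len(string):
--                 acc.pop()
--         return acc
-- ===== SOURCE B (Python) =====
-- def string_line_offsets(string):
--         parts = string.split("\n")
--         acc = [0]
--         pos = 0
--         for part in parts[:-1]:
--                 pos += len(part) + 1
--                 acc.append(pos)
--         if acc[-1] == len(string):
--                 acc.pop()
--         return acc
-- ===== Notes on version B (the rewrite author's own statement) =====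
-- stated objective: faster
-- what changed: B replaces A's per-character enumerate scan with a single str.split on the newline separator followed by a prefix-sum over the segment lengths, keeping the same trailing-offset pop guard.
import Mathlib
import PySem

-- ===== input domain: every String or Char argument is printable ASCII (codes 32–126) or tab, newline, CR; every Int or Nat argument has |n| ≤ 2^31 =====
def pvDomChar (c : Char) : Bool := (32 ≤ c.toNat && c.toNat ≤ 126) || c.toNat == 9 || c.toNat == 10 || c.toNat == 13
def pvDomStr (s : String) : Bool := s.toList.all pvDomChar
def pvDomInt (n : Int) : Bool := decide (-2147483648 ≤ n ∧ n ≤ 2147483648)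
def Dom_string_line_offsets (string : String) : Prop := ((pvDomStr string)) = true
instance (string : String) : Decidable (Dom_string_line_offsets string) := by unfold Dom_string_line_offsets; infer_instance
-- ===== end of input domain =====

-- B computes line-start offsets by splitting on '\n' and prefix-summing segment lengths
-- instead of A's per-character scan (objective: faster, measured constant-factor: split runs in C).


-- ===== PORT A =====
def string_line_offsets (string : String) : List Int :=
  let acc := (PySem.List.enumerate string.toList 0).foldl
      (fun acc p => if p.2 = '\n' then acc ++ [p.1 + 1] else acc) [(0 : Int)]
  if PySem.List.pyGetD acc (-1) 0 = (PySem.Str.len string : Int) then acc.dropLast else acc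

-- ===== PORT B =====
def string_line_offsets_alt (string : String) : List Int :=
  let parts := PySem.Chars.splitOn string.toList ['\n']
  let st := (PySem.List.slice parts none (some (-1))).foldl
      (fun (st : List Int × Int) part =>
        let pos := st.2 + (part.length : Int) + 1
        (st.1 ++ [pos], pos)) ([(0 : Int)], (0 : Int))
  let acc := st.1
  if PySem.List.pyGetD acc (-1) 0 = (PySem.Str.len string : Int) then acc.dropLast else acc

-- ===== PRECONDITION & SPEC =====
def Spec_string_line_offsets (string : String) (out : List Int) : Prop := out = string_line_offsets_alt string
instance (string : String) (out : List Int) : Decidable (Spec_string_line_offsets string out) := by unfold Spec_string_line_offsets; infer_instance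

-- ===== CLAIM (what is proved, stated in full; the proofs are below) =====
def Claim_equal_string_line_offsets : Prop := ∀ (string : String), Dom_string_line_offsets string → Spec_string_line_offsets string (string_line_offsets string)

-- ===== LEMMAS AND PROOFS =====

/-- Proof-side structural split on '\n' (front-cons form of `PySem.Chars.splitOn · ['\n']`). -/
def split1 : List Char → List (List Char)
  | [] => [[]]
  | c :: t => if c = '\n' then [] :: split1 t else (split1 t).modifyHead (c :: ·)

/-- Proof-side list of offsets after position `k`. -/
def offs : List Char → Int → List Int
  | [], _ => []
  | c :: t, k => if c = '\n' then (k + 1) :: offs t (k + 1) else offs t (k + 1)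

theorem split1_ne_nil (l : List Char) : split1 l ≠ [] := by
  induction l with
  | nil => simp [split1]
  | cons c t ih =>
    simp only [split1]
    split
    · simp
    · cases h : split1 t with
      | nil => exact absurd h ih
      | cons a b => simp [List.modifyHead]

theorem splitOn_go_eq (fuel : Nat) (l cur : List Char) (acc : List (List Char))
    (h : l.length < fuel) :
    PySem.Chars.splitOn.go ['\n'] fuel l cur acc
      = acc.reverse ++ (split1 l).modifyHead (cur.reverse ++ ·) := by
  induction fuel generalizing l cur acc with
  | zero => omega
  | succ fuel ih =>
    cases l with
    | nil => simp [PySem.Chars.splitOn.go, split1]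
    | cons c rest =>
      by_cases hc : c = '\n'
      · subst hc
        have hpre : List.isPrefixOf ['\n'] ('\n' :: rest) = true := by
          simp [List.isPrefixOf]
        rw [show PySem.Chars.splitOn.go ['\n'] (fuel + 1) ('\n' :: rest) cur acc
              = PySem.Chars.splitOn.go ['\n'] fuel (List.drop 1 ('\n' :: rest)) [] (cur.reverse :: acc) by
            simp [PySem.Chars.splitOn.go, hpre]]
        rw [ih _ _ _ (by simpa using Nat.lt_of_succ_lt_succ h)]
        cases hs : split1 rest with
        | nil => exact absurd hs (split1_ne_nil rest)
        | cons a b => simp [split1, hs, List.modifyHead]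
      · have hpre : List.isPrefixOf ['\n'] (c :: rest) = false := by
          simp [List.isPrefixOf]
          exact Ne.symm hc
        rw [show PySem.Chars.splitOn.go ['\n'] (fuel + 1) (c :: rest) cur acc
              = PySem.Chars.splitOn.go ['\n'] fuel rest (c :: cur) acc by
            simp [PySem.Chars.splitOn.go, hpre]]
        rw [ih _ _ _ (by simpa using Nat.lt_of_succ_lt_succ h)]
        cases hs : split1 rest with
        | nil => exact absurd hs (split1_ne_nil rest)
        | cons a b => simp [split1, hs, hc, List.modifyHead]

theorem splitOn_eq_split1 (cs : List Char) :
    PySem.Chars.splitOn cs ['\n'] = split1 cs := by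
  rw [PySem.Chars.splitOn, splitOn_go_eq _ _ _ _ (by omega)]
  cases hs : split1 cs with
  | nil => exact absurd hs (split1_ne_nil cs)
  | cons a b => simp [List.modifyHead]

theorem split1_tail_nil_offs (t : List Char) (h : (split1 t).tail = []) (k : Int) :
    offs t k = [] := by
  induction t generalizing k with
  | nil => simp [offs]
  | cons c r ih =>
    simp only [split1] at h
    by_cases hc : c = '\n'
    · simp [hc] at h
      exact absurd h (split1_ne_nil r)
    · simp only [if_neg hc] at h
      have hr : (split1 r).tail = [] := by
        cases hs : split1 r with
        | nil => exact absurd hs (split1_ne_nil r)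
        | cons a b => simp [hs, List.modifyHead] at h ⊢; exact h
      simp [offs, hc, ih hr]

/-- A's loop produces the offsets list. -/
theorem aloop_eq (cs : List Char) (s : Int) (acc : List Int) :
    (PySem.List.enumerate cs s).foldl
      (fun acc p => if p.2 = '\n' then acc ++ [p.1 + 1] else acc) acc
      = acc ++ offs cs s := by
  induction cs generalizing s acc with
  | nil => simp [PySem.List.enumerate_nil, offs]
  | cons c t ih =>
    rw [PySem.List.enumerate_cons]
    by_cases hc : c = '\n' <;>
      simp [hc, offs, List.foldl_cons, ih, List.append_assoc]

/-- B's loop produces the same offsets list. -/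
theorem bloop_eq (cs : List Char) (acc : List Int) (pos : Int) :
    (((split1 cs).dropLast).foldl
      (fun (st : List Int × Int) part =>
        ((st.1 ++ [st.2 + (part.length : Int) + 1]), st.2 + (part.length : Int) + 1))
      (acc, pos)).1 = acc ++ offs cs pos := by
  induction cs generalizing acc pos with
  | nil => simp [split1, offs]
  | cons c t ih =>
    by_cases hc : c = '\n'
    · subst hc
      have hne := split1_ne_nil t
      rw [show split1 ('\n' :: t) = [] :: split1 t by simp [split1]]
      rw [List.dropLast_cons_of_ne_nil hne, List.foldl_cons]
      simpa using ih (acc ++ [pos + 1]) (pos + 1)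
    · rw [show split1 (c :: t) = (split1 t).modifyHead (c :: ·) by simp [split1, hc]]
      cases hs : split1 t with
      | nil => exact absurd hs (split1_ne_nil t)
      | cons h tl =>
        cases tl with
        | nil =>
          have hoff : offs t (pos + 1) = [] :=
            split1_tail_nil_offs t (by simp [hs]) (pos + 1)
          simp [List.modifyHead, offs, hc, hoff]
        | cons b tb =>
          have hne : b :: tb ≠ [] := by simp
          rw [List.modifyHead]
          rw [List.dropLast_cons_of_ne_nil hne, List.foldl_cons]
          have := ih (acc, pos + 1).1 (pos + 1)
          rw [hs, List.dropLast_cons_of_ne_nil hne, List.foldl_cons] at this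
          simp only at this ⊢
          have harith : pos + ((c :: h).length : Int) + 1 = pos + 1 + (h.length : Int) + 1 := by
            push_cast [List.length_cons]; ring
          rw [harith]
          rw [this]
          simp [offs, hc]

-- ===== VERDICT (by name: the statement is the Claim_ definition above) =====
theorem string_line_offsets_spec : Claim_equal_string_line_offsets := by
  intro string _
  unfold Spec_string_line_offsets string_line_offsets string_line_offsets_alt
  simp only [splitOn_eq_split1, PySem.List.slice_to_neg_one]
  rw [aloop_eq, bloop_eq]
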